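-- pv_equiv track=rewrite | github.com/enjoy-digital/litex | misoc/cores/framebuffer/dvi.py | _decode_tmds
-- ===== SOURCE A (Python) =====
-- control_tokens = [0b1101010100, 0b0010101011, 0b0101010100, 0b1010101011]
--
-- def _bit(i, n):
--     return (i >> n) & 1
--
-- def _decode_tmds(b):
--     try:
--         c = control_tokens.index(b)
--         de = False
--     except ValueError:
--         c = 0
--         de = True
--     vsync = bool(c & 2)
--     hsync = bool(c & 1)
--
--     value = _bit(b, 0) ^ _bit(b, 9)
--     for i in range(1, 8):
--         value |= (_bit(b, i) ^ _bit(b, i-1) ^ (~_bit(b, 8) & 1)) << i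
--
--     return de, hsync, vsync, value
-- ===== SOURCE B (Python) =====
-- control_tokens = [0b1101010100, 0b0010101011, 0b0101010100, 0b1010101011]
--
-- _CTRL = {0b1101010100: 0, 0b0010101011: 1, 0b0101010100: 2, 0b1010101011: 3}
--
-- def _decode_tmds(b):
--     c = _CTRL.get(b)
--     de = c is None
--     if de:
--         c = 0
--     vsync = bool(c & 2)
--     hsync = bool(c & 1)
--
--     x = b & 0xFF
--     diff = (x ^ (x << 1)) & 0xFF
--     if (b >> 8) & 1 == 0:
--         diff ^= 0xFE
--     diff ^= (b >> 9) & 1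
--
--     return de, hsync, vsync, diff
-- ===== Notes on version B (the rewrite author's own statement) =====
-- stated objective: simpler
-- what changed: The 8-iteration bit-by-bit decode loop is replaced by a closed-form bitwise computation (diff = (x ^ (x<<1)) & 0xFF with a conditional XNOR mask and a b0^b9 fix-up), and the linear list.index/try-except control lookup by a single dict lookup.
import Mathlib
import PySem

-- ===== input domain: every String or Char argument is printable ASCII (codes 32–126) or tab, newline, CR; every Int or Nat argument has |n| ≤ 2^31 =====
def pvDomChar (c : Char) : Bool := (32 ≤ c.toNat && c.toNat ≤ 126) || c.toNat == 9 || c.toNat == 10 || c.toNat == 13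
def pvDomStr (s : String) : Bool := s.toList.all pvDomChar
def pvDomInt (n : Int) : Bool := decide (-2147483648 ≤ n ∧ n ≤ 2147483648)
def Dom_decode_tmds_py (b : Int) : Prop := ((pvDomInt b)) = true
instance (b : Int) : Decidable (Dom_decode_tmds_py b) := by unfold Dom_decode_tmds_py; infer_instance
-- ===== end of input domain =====

-- B replaces A's 8-iteration per-bit decode loop with a closed-form bitwise formula and the
-- list.index control lookup with a dict lookup (objective: simpler).

-- ===== PORT A =====
def control_tokens : List Int := [852, 171, 340, 683]

-- _bit(i, n); n is always a small non-negative literal in A, so it is taken as Nat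
def bit_py (i : Int) (n : Nat) : Int := PySem.Int.band (i >>> n) 1

-- the loop building `value` in A
def value_a (b : Int) : Int :=
  (PySem.List.pyRange 1 8 1).foldl
    (fun value i =>
      PySem.Int.bor value
        ((PySem.Int.bxor (PySem.Int.bxor (bit_py b i.toNat) (bit_py b (i.toNat - 1)))
            (PySem.Int.band (Int.not (bit_py b 8)) 1)) <<< i.toNat))
    (PySem.Int.bxor (bit_py b 0) (bit_py b 9))

def decode_tmds_py (b : Int) : Bool × Bool × Bool × Int :=
  -- try: c = control_tokens.index(b); de = False / except ValueError: c = 0; de = True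
  let cde : Int × Bool :=
    match PySem.List.index? control_tokens b with
    | some c => ((c : Int), false)
    | none => (0, true)
  let vsync : Bool := decide (PySem.Int.band cde.1 2 ≠ 0)
  let hsync : Bool := decide (PySem.Int.band cde.1 1 ≠ 0)
  (cde.2, hsync, vsync, value_a b)

-- ===== PORT B =====
def ctrl_table : PySem.Dict Int Int :=
  PySem.Dict.ofList [(852, 0), (171, 1), (340, 2), (683, 3)]

-- the closed-form diff computation in B
def value_b (b : Int) : Int :=
  let x := PySem.Int.band b 255
  let diff0 := PySem.Int.band (PySem.Int.bxor x (x <<< (1 : Nat))) 255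
  let diff1 := if PySem.Int.band (b >>> (8 : Nat)) 1 == 0 then PySem.Int.bxor diff0 254 else diff0
  PySem.Int.bxor diff1 (PySem.Int.band (b >>> (9 : Nat)) 1)

def decode_tmds_py_alt (b : Int) : Bool × Bool × Bool × Int :=
  let c? := PySem.Dict.get? ctrl_table b
  let de := c?.isNone
  let c := c?.getD 0
  let vsync : Bool := decide (PySem.Int.band c 2 ≠ 0)
  let hsync : Bool := decide (PySem.Int.band c 1 ≠ 0)
  (de, hsync, vsync, value_b b)

-- ===== PRECONDITION & SPEC =====
def Spec_decode_tmds_py (b : Int) (out : Bool × Bool × Bool × Int) : Prop := out = decode_tmds_py_alt b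
instance (b : Int) (out : Bool × Bool × Bool × Int) : Decidable (Spec_decode_tmds_py b out) := by unfold Spec_decode_tmds_py; infer_instance

-- ===== CLAIM (what is proved, stated in full; the proofs are below) =====
def Claim_equal_decode_tmds_py : Prop := ∀ (b : Int), Dom_decode_tmds_py b → Spec_decode_tmds_py b (decode_tmds_py b)

-- ===== LEMMAS AND PROOFS =====

lemma band_mask255 (a : Int) : PySem.Int.band a 255 = a % 256 := by
  by_cases h : 0 ≤ a
  · simp only [PySem.Int.band, if_pos h, if_pos (by norm_num : (0:Int) ≤ 255)]
    have h2 : a.toNat &&& (255:Int).toNat = a.toNat % 256 := Nat.and_two_pow_sub_one_eq_mod a.toNat 8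
    omega
  · simp only [PySem.Int.band, if_neg h, if_pos (by norm_num : (0:Int) ≤ 255)]
    have h2 : (255:Int).toNat &&& (-a - 1).toNat = (-a - 1).toNat % 256 := by
      rw [Nat.and_comm]; exact Nat.and_two_pow_sub_one_eq_mod _ 8
    omega

lemma band1_eq (a : Int) : PySem.Int.band a 1 = a % 2 := by
  rw [PySem.Int.band_one, PySem.Int.mod_eq_emod_of_pos (by norm_num : (0:Int) < 2)]

lemma bit_emod (b : Int) (n : Nat) (h : n ≤ 9) : bit_py b n = bit_py (b % 1024) n := by
  unfold bit_py
  rw [band1_eq, band1_eq, Int.shiftRight_eq_div_pow, Int.shiftRight_eq_div_pow]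
  interval_cases n <;> norm_num <;> omega

lemma value_a_emod (b : Int) : value_a b = value_a (b % 1024) := by
  have h0 := bit_emod b 0 (by norm_num)
  have h1 := bit_emod b 1 (by norm_num)
  have h2 := bit_emod b 2 (by norm_num)
  have h3 := bit_emod b 3 (by norm_num)
  have h4 := bit_emod b 4 (by norm_num)
  have h5 := bit_emod b 5 (by norm_num)
  have h6 := bit_emod b 6 (by norm_num)
  have h7 := bit_emod b 7 (by norm_num)
  have h8 := bit_emod b 8 (by norm_num)
  have h9 := bit_emod b 9 (by norm_num)
  have hr : PySem.List.pyRange 1 8 1 = [1, 2, 3, 4, 5, 6, 7] := by decide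
  simp only [value_a, hr, List.foldl,
    show ((1 : Int).toNat) = 1 from rfl, show ((2 : Int).toNat) = 2 from rfl,
    show ((3 : Int).toNat) = 3 from rfl, show ((4 : Int).toNat) = 4 from rfl,
    show ((5 : Int).toNat) = 5 from rfl, show ((6 : Int).toNat) = 6 from rfl,
    show ((7 : Int).toNat) = 7 from rfl]
  norm_num
  simp only [h0, h1, h2, h3, h4, h5, h6, h7, h8, h9]

lemma value_b_emod (b : Int) : value_b b = value_b (b % 1024) := by
  have h8 : PySem.Int.band (b >>> (8 : Nat)) 1 = PySem.Int.band ((b % 1024) >>> (8 : Nat)) 1 := by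
    have := bit_emod b 8 (by norm_num); simpa only [bit_py] using this
  have h9 : PySem.Int.band (b >>> (9 : Nat)) 1 = PySem.Int.band ((b % 1024) >>> (9 : Nat)) 1 := by
    have := bit_emod b 9 (by norm_num); simpa only [bit_py] using this
  have hx : PySem.Int.band b 255 = PySem.Int.band (b % 1024) 255 := by
    rw [band_mask255, band_mask255]; omega
  simp only [value_b, hx, h8, h9]

set_option maxRecDepth 100000 in
set_option maxHeartbeats 2000000 in
lemma values_eq_small : ∀ i : Fin 1024, value_a (i.val : Int) = value_b (i.val : Int) := by decide

lemma values_eq (b : Int) : value_a b = value_b b := by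
  have hb : b % 1024 = (((b % 1024).toNat : Nat) : Int) := by omega
  have hlt : (b % 1024).toNat < 1024 := by omega
  have := values_eq_small ⟨(b % 1024).toNat, hlt⟩
  rw [value_a_emod b, value_b_emod b, hb]
  exact this

lemma index?_none (b : Int) (h1 : b ≠ 852) (h2 : b ≠ 171) (h3 : b ≠ 340) (h4 : b ≠ 683) :
    PySem.List.index? control_tokens b = none := by
  rw [PySem.List.index?_eq_none_iff]
  simp [control_tokens]
  exact ⟨h1, h2, h3, h4⟩

lemma get?_none (b : Int) (h1 : b ≠ 852) (h2 : b ≠ 171) (h3 : b ≠ 340) (h4 : b ≠ 683) :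
    PySem.Dict.get? ctrl_table b = none := by
  have ht : ctrl_table = PySem.Dict.mk [(852, 0), (171, 1), (340, 2), (683, 3)] := by decide
  rw [ht]
  simp [PySem.Dict.get?, beq_iff_eq, Ne.symm h1, Ne.symm h2, Ne.symm h3,
    Ne.symm h4]

-- ===== VERDICT (by name: the statement is the Claim_ definition above) =====
theorem decode_tmds_py_spec : Claim_equal_decode_tmds_py := by
  intro b _
  unfold Spec_decode_tmds_py
  by_cases h1 : b = 852
  · subst h1; decide
  by_cases h2 : b = 171
  · subst h2; decide
  by_cases h3 : b = 340
  · subst h3; decide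
  by_cases h4 : b = 683
  · subst h4; decide
  simp only [decode_tmds_py, decode_tmds_py_alt, index?_none b h1 h2 h3 h4,
    get?_none b h1 h2 h3 h4, Option.isNone_none, Option.getD_none, values_eq b]
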